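-- pv_equiv track=rewrite | github.com/maxpilling/curriculum_learning | CNN/common/preprocess.py | make_default_args
-- ===== SOURCE A (Python) =====
-- def make_default_args(arg_names):
--     """make_default_args
--
--     Make a default set of arguments.
--
--     :param arg_names: A list of argument names.
--     """
--
--     default_args = []
--     spatial_seen = False
--     spatial_arguments = ["screen", "minimap", "screen2"]
--
--     for k in arg_names:
--         if k in spatial_arguments:
--             spatial_seen = True
--             continue
--         else:
--             assert not spatial_seen, "Got %s argument after spatial argument" % k
--             default_args.append([0])
--
--     return tuple(default_args), spatial_seen
-- ===== SOURCE B (Python) =====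
-- def make_default_args(arg_names):
--     """Locate the boundary of the first spatial argument, then validate the tail."""
--     spatial_arguments = ["screen", "minimap", "screen2"]
--     boundary = next((i for i, k in enumerate(arg_names) if k in spatial_arguments),
--                     len(arg_names))
--     for k in arg_names[boundary + 1:]:
--         assert k in spatial_arguments, "Got %s argument after spatial argument" % k
--     spatial_seen = boundary < len(arg_names)
--     return tuple([0] for _ in range(boundary)), spatial_seen
-- ===== Notes on version B (the rewrite author's own statement) =====
-- stated objective: alternative
-- what changed: B replaces A's single accumulating pass with a locate-boundary-then-validate-tail decomposition: it finds the index of the first spatial argument, builds the defaults as a replicated prefix, and checks the suffix separately.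
import Mathlib
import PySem

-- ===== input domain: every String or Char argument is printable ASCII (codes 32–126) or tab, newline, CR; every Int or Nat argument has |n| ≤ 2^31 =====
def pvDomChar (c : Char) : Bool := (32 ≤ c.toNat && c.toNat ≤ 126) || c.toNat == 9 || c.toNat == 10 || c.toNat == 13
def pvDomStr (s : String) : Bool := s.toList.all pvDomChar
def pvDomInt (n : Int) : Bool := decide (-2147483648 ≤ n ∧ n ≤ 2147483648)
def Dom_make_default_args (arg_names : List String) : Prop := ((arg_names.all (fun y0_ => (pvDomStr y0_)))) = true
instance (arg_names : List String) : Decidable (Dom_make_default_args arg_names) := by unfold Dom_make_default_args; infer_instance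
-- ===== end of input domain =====

-- B replaces A's accumulating pass by a locate-boundary-then-validate-tail decomposition; return values proved equal on Pre_ (inputs where A's assertion does not fire).

-- ===== PORT A =====
def pvSpatialArgs : List String := ["screen", "minimap", "screen2"]

-- the for-loop of A, carrying (default_args, spatial_seen); the assert raises in
-- Python on inputs excluded by Pre_, there the branch just continues
def pvMakeLoop : List String → List (List Int) → Bool → List (List Int) × Bool
  | [], acc, seen => (acc, seen)
  | k :: rest, acc, seen =>
    if pvSpatialArgs.contains k then pvMakeLoop rest acc true
    else pvMakeLoop rest (acc ++ [[0]]) seen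

def make_default_args (arg_names : List String) : List (List Int) × Bool :=
  pvMakeLoop arg_names [] false

-- ===== PORT B =====
-- index of the first spatial argument (len if none): the `next(...)` of Source B
def pvBoundary : List String → Nat
  | [] => 0
  | k :: rest => if pvSpatialArgs.contains k then 0 else 1 + pvBoundary rest

def make_default_args_alt (arg_names : List String) : List (List Int) × Bool :=
  let boundary := pvBoundary arg_names
  (List.replicate boundary [0], decide (boundary < arg_names.length))

-- ===== PRECONDITION & SPEC =====
-- Pre_ excludes exactly the inputs where A raises AssertionError (a non-spatial
-- name after a spatial one); B raises the same AssertionError there.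
def Pre_make_default_args (arg_names : List String) : Prop :=
  List.Pairwise (fun a b : Bool => a = true → b = true)
    (arg_names.map (fun k => (["screen", "minimap", "screen2"] : List String).contains k))
instance (arg_names : List String) : Decidable (Pre_make_default_args arg_names) := by
  unfold Pre_make_default_args; infer_instance
def pvWitness_make_default_args : List String := ["move", "select", "screen"]

def Spec_make_default_args (arg_names : List String) (out : List (List Int) × Bool) : Prop := out = make_default_args_alt arg_names
instance (arg_names : List String) (out : List (List Int) × Bool) : Decidable (Spec_make_default_args arg_names out) := by unfold Spec_make_default_args; infer_instance

-- ===== CLAIM (what is proved, stated in full; the proofs are below) =====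
def Claim_equal_make_default_args : Prop := ∀ (arg_names : List String), Dom_make_default_args arg_names → Pre_make_default_args arg_names → Spec_make_default_args arg_names (make_default_args arg_names)

-- ===== LEMMAS AND PROOFS =====
lemma pvMakeLoop_all_spatial (l : List String) (acc : List (List Int)) 
    (h : ∀ x ∈ l, pvSpatialArgs.contains x = true) :
    pvMakeLoop l acc true = (acc, true) := by
  induction l with
  | nil => rfl
  | cons k rest ih =>
    simp only [pvMakeLoop, h k (by simp), if_true]
    exact ih (fun x hx => h x (by simp [hx]))

lemma pvMakeLoop_eq (l : List String) (acc : List (List Int))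
    (h : Pre_make_default_args l) :
    pvMakeLoop l acc false
      = (acc ++ List.replicate (pvBoundary l) [0], decide (pvBoundary l < l.length)) := by
  induction l generalizing acc with
  | nil => simp [pvMakeLoop, pvBoundary]
  | cons k rest ih =>
    unfold Pre_make_default_args at h
    simp only [List.map_cons, List.pairwise_cons] at h
    by_cases hk : pvSpatialArgs.contains k = true
    · have hall : ∀ x ∈ rest, pvSpatialArgs.contains x = true := by
        intro x hx
        exact h.1 _ (List.mem_map_of_mem hx) (by simpa [pvSpatialArgs] using hk)
      simp only [pvMakeLoop, hk, if_true, pvBoundary]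
      rw [pvMakeLoop_all_spatial rest acc hall]
      simp
    · simp only [pvMakeLoop, hk, pvBoundary]
      rw [ih (acc ++ [[0]]) h.2]
      have hb : pvSpatialArgs.contains k = false := by simpa using hk
      simp [List.replicate_succ, List.append_assoc, Nat.add_comm 1 (pvBoundary rest)]

-- ===== VERDICT (by name: the statement is the Claim_ definition above) =====
theorem make_default_args_spec : Claim_equal_make_default_args := by
  intro arg_names _ hpre
  unfold Spec_make_default_args make_default_args make_default_args_alt
  simpa using pvMakeLoop_eq arg_names [] hpre
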